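-- pv_equiv track=rewrite | github.com/zengzh72/CMVCG | dataset.py | insert_masks
-- ===== SOURCE A (Python) =====
-- def insert_masks(comment_id, comment_gt_id, pad_token_id=0, mask_token_id=5):
--     masked_comment_id = []
--     masked_lm_labels = []
--
--     for tc,tg in zip(comment_id[:-1],comment_gt_id[:-1]):
--         masked_comment_id.append(tc)
--         masked_lm_labels.append(-1)
--
--         masked_comment_id.append(mask_token_id)
--         masked_lm_labels.append(tg)
--
--     masked_comment_id.append(comment_id[-1])
--     masked_lm_labels.append(-1)
--
--     return masked_comment_id,masked_lm_labels
-- ===== SOURCE B (Python) =====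
-- def insert_masks(comment_id, comment_gt_id, pad_token_id=0, mask_token_id=5):
--     n = min(len(comment_id), len(comment_gt_id)) - 1
--     if n < 0:
--         n = 0
--     size = 2 * n + 1
--     masked_comment_id = [mask_token_id] * size
--     masked_lm_labels = [-1] * size
--     masked_comment_id[0:2 * n:2] = comment_id[:n]
--     masked_comment_id[2 * n] = comment_id[-1]
--     masked_lm_labels[1:2 * n:2] = comment_gt_id[:n]
--     return masked_comment_id, masked_lm_labels
-- ===== Notes on version B (the rewrite author's own statement) =====
-- stated objective: alternative
-- what changed: Replaces the sequential zip-append loop by length computation, preallocated mask/-1 arrays and strided slice-assignment fills (comment ids at even positions, gt ids at odd positions).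
import Mathlib
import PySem

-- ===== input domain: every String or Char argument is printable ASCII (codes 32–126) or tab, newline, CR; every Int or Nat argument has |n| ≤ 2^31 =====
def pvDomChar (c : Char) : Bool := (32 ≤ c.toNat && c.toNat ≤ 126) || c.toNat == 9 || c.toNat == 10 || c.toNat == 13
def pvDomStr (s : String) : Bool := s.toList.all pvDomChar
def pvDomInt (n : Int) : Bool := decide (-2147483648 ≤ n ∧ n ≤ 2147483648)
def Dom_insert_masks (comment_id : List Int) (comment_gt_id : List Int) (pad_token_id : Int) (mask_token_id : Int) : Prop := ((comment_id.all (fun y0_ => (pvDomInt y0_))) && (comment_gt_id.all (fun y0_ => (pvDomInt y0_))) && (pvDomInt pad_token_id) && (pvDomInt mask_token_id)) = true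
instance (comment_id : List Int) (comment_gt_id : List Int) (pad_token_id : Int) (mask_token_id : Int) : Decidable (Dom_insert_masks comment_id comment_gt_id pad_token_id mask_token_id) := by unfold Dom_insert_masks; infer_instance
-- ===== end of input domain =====

-- B replaces A's zip-append loop by preallocated mask/-1 arrays filled with strided slice
-- assignments (a different decomposition, same cost). Equivalence of return values is proved
-- for nonempty comment_id; on empty comment_id both Pythons raise IndexError.

-- ===== PORT A =====
-- for tc,tg in zip(comment_id[:-1], comment_gt_id[:-1]): append tc,-1 then mask,tg; finally append comment_id[-1],-1
def insert_masks (comment_id : List Int) (comment_gt_id : List Int) (pad_token_id : Int) (mask_token_id : Int) : List Int × List Int :=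
  let pairs := List.zip (PySem.List.slice comment_id none (some (-1))) (PySem.List.slice comment_gt_id none (some (-1)))
  let acc := pairs.foldl
    (fun (acc : List Int × List Int) (p : Int × Int) =>
      (acc.1 ++ [p.1, mask_token_id], acc.2 ++ [(-1 : Int), p.2]))
    ([], [])
  -- comment_id[-1]: IndexError on empty comment_id, excluded by Pre_
  (acc.1 ++ [(PySem.List.pyGet? comment_id (-1)).getD 0], acc.2 ++ [(-1 : Int)])

-- ===== PORT B =====
-- lst[start:start+2*len(vals):2] = vals for start = 0 (even positions)
def evenAssign : List Int → List Int → List Int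
  | [], l => l
  | _ :: _, [] => []
  | v :: _, [_] => [v]
  | v :: vs, _ :: b :: rest => v :: b :: evenAssign vs rest

-- lst[1:1+2*len(vals):2] = vals (odd positions)
def oddAssign : List Int → List Int → List Int
  | _, [] => []
  | vs, a :: rest => a :: evenAssign vs rest

def insert_masks_alt (comment_id : List Int) (comment_gt_id : List Int) (pad_token_id : Int) (mask_token_id : Int) : List Int × List Int :=
  let n : Nat := min comment_id.length comment_gt_id.length - 1   -- Nat subtraction clamps, = max(0, min-1)
  let size := 2 * n + 1
  let masked_comment_id := evenAssign (comment_id.take n) (List.replicate size mask_token_id)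
  -- comment_id[-1]: IndexError on empty comment_id, excluded by Pre_
  let masked_comment_id := masked_comment_id.set (2 * n) ((PySem.List.pyGet? comment_id (-1)).getD 0)
  let masked_lm_labels := oddAssign (comment_gt_id.take n) (List.replicate size (-1 : Int))
  (masked_comment_id, masked_lm_labels)

-- ===== PRECONDITION & SPEC =====
-- Pre_ excludes exactly empty comment_id, where both A and B raise IndexError (comment_id[-1]).
def Pre_insert_masks (comment_id : List Int) (comment_gt_id : List Int) (pad_token_id : Int) (mask_token_id : Int) : Prop := comment_id ≠ []
instance (comment_id : List Int) (comment_gt_id : List Int) (pad_token_id : Int) (mask_token_id : Int) : Decidable (Pre_insert_masks comment_id comment_gt_id pad_token_id mask_token_id) := by unfold Pre_insert_masks; infer_instance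
def pvWitness_insert_masks : List Int × List Int × Int × Int := ([7, 8, 9], [1, 2, 3], 0, 5)

def Spec_insert_masks (comment_id : List Int) (comment_gt_id : List Int) (pad_token_id : Int) (mask_token_id : Int) (out : List Int × List Int) : Prop := out = insert_masks_alt comment_id comment_gt_id pad_token_id mask_token_id
instance (comment_id : List Int) (comment_gt_id : List Int) (pad_token_id : Int) (mask_token_id : Int) (out : List Int × List Int) : Decidable (Spec_insert_masks comment_id comment_gt_id pad_token_id mask_token_id out) := by unfold Spec_insert_masks; infer_instance

-- ===== CLAIM (what is proved, stated in full; the proofs are below) =====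
def Claim_equal_insert_masks : Prop := ∀ (comment_id : List Int) (comment_gt_id : List Int) (pad_token_id : Int) (mask_token_id : Int), Dom_insert_masks comment_id comment_gt_id pad_token_id mask_token_id → Pre_insert_masks comment_id comment_gt_id pad_token_id mask_token_id → Spec_insert_masks comment_id comment_gt_id pad_token_id mask_token_id (insert_masks comment_id comment_gt_id pad_token_id mask_token_id)

-- ===== LEMMAS AND PROOFS =====

-- A's loop as a pair of flatMaps
lemma foldA (m : Int) (zs : List (Int × Int)) (a b : List Int) :
    zs.foldl (fun (acc : List Int × List Int) (p : Int × Int) =>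
        (acc.1 ++ [p.1, m], acc.2 ++ [(-1 : Int), p.2])) (a, b)
      = (a ++ zs.flatMap (fun p => [p.1, m]), b ++ zs.flatMap (fun p => [(-1 : Int), p.2])) := by
  induction zs generalizing a b with
  | nil => simp
  | cons z zs ih => simp [List.foldl_cons, ih]

lemma mapFstZip (l l' : List Int) : (List.zip l l').map Prod.fst = l.take l'.length := by
  induction l generalizing l' with
  | nil => simp
  | cons x xs ih => cases l' with
    | nil => simp
    | cons y ys => simp [ih]

lemma mapSndZip (l l' : List Int) : (List.zip l l').map Prod.snd = l'.take l.length := by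
  induction l generalizing l' with
  | nil => simp
  | cons x xs ih => cases l' with
    | nil => simp
    | cons y ys => simp [ih]

lemma evenAssign_fill (m : Int) (vs : List Int) (t : Nat) :
    evenAssign vs (List.replicate (2 * vs.length + t) m)
      = vs.flatMap (fun v => [v, m]) ++ List.replicate t m := by
  induction vs with
  | nil => simp [evenAssign]
  | cons v vs ih =>
      have h : 2 * (v :: vs).length + t = (2 * vs.length + t) + 1 + 1 := by
        simp [List.length_cons]; ring
      rw [h, List.replicate_succ, List.replicate_succ, evenAssign, ih]
      simp

lemma set_last (l : List Int) (x y : Int) : (l ++ [x]).set l.length y = l ++ [y] := by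
  induction l with
  | nil => simp
  | cons a l ih => simp [ih]

lemma shift_labels (zs : List (Int × Int)) :
    zs.flatMap (fun p => [(-1 : Int), p.2]) ++ [(-1 : Int)]
      = (-1 : Int) :: zs.flatMap (fun p => [p.2, (-1 : Int)]) := by
  induction zs with
  | nil => simp
  | cons z zs ih => simp [ih]

lemma len2 (l : List Int) (f g : Int → Int) :
    (l.flatMap (fun v => [f v, g v])).length = 2 * l.length := by
  induction l with
  | nil => simp
  | cons x xs ih => simp [ih]; omega

-- ===== VERDICT (by name: the statement is the Claim_ definition above) =====
theorem insert_masks_spec : Claim_equal_insert_masks := by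
  intro cid cgt pad m _ hpre
  unfold Spec_insert_masks insert_masks insert_masks_alt
  simp only [PySem.List.slice_to_neg_one, foldA, List.nil_append]
  set L := (PySem.List.pyGet? cid (-1)).getD 0 with hL
  set n : Nat := min cid.length cgt.length - 1 with hn
  set zs := List.zip cid.dropLast cgt.dropLast with hzs
  have hfst : zs.map Prod.fst = cid.take n := by
    rw [hzs, mapFstZip, List.dropLast_eq_take, List.dropLast_eq_take,
        List.length_take, List.take_take]
    congr 1; omega
  have hsnd : zs.map Prod.snd = cgt.take n := by
    rw [hzs, mapSndZip, List.dropLast_eq_take, List.dropLast_eq_take,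
        List.length_take, List.take_take]
    congr 1; omega
  have hlc : (cid.take n).length = n := by
    rw [List.length_take]; omega
  have hgc : (cgt.take n).length = n := by
    rw [List.length_take]; omega
  have hS1 : List.replicate (2 * n + 1) m = List.replicate (2 * (cid.take n).length + 1) m := by
    rw [hlc]
  have hS2 : List.replicate (2 * n) (-1 : Int) = List.replicate (2 * (cgt.take n).length + 0) (-1 : Int) := by
    rw [hgc]; simp
  have hflat1 : zs.flatMap (fun p => [p.1, m]) = (cid.take n).flatMap (fun v => [v, m]) := by
    rw [← hfst, List.flatMap_map]
  have hflat2 : zs.flatMap (fun p => [(-1 : Int), p.2]) ++ [(-1 : Int)]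
      = (-1 : Int) :: (cgt.take n).flatMap (fun v => [v, (-1 : Int)]) := by
    rw [shift_labels, ← hsnd, List.flatMap_map]
  have hlen : ((cid.take n).flatMap (fun v => [v, m])).length = 2 * n := by
    rw [len2 (cid.take n) (fun v => v) (fun _ => m), hlc]
  refine Prod.ext ?_ ?_
  · show zs.flatMap (fun p => [p.1, m]) ++ [L]
      = (evenAssign (cid.take n) (List.replicate (2 * n + 1) m)).set (2 * n) L
    rw [hS1, evenAssign_fill, List.replicate_one, ← hlen, set_last, hflat1]
  · show zs.flatMap (fun p => [(-1 : Int), p.2]) ++ [(-1 : Int)]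
      = oddAssign (cgt.take n) (List.replicate (2 * n + 1) (-1 : Int))
    rw [List.replicate_succ, oddAssign, hS2, evenAssign_fill]
    simp [hflat2]
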